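-- pv_equiv track=rewrite | github.com/JTibs18/LeetCode | CountAsterisks.py | countAsterisks1
-- ===== SOURCE A (Python) =====
-- def countAsterisks1(s):
--     inPair = False
--     asterisksCount = 0
--
--     for i in s:
--         if i == "|":
--             inPair = not inPair
--         elif i == "*" and not inPair:
--             asterisksCount += 1
--
--     return asterisksCount
-- ===== SOURCE B (Python) =====
-- def countAsterisks1(s):
--     parts = s.split('|')
--     return sum(seg.count('*') for i, seg in enumerate(parts) if i % 2 == 0)
-- ===== Notes on version B (the rewrite author's own statement) =====
-- stated objective: faster
-- what changed: Replaces the per-character inPair state toggle with splitting the string on the bar character and summing the asterisk counts of the even-indexed segments (exactly the regions outside bar pairs), pushing the scan into C-level str.split/str.count.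
import Mathlib
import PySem

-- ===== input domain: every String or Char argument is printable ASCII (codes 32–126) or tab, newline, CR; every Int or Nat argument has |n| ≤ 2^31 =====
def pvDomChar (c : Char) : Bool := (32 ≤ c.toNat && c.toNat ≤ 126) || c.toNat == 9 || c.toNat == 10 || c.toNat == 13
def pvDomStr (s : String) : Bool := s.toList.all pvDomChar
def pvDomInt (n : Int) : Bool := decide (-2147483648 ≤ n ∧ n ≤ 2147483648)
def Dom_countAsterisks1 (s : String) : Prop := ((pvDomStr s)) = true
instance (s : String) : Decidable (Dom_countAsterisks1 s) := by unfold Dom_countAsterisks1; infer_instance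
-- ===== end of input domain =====

-- B replaces A's per-character inPair toggle by splitting on the bar and summing the asterisk counts of even-indexed segments (measured faster: the scan moves into C-level str.split/str.count).

-- ===== PORT A =====
def countAsterisks1 (s : String) : Int :=
  (s.toList.foldl
    (fun st c =>
      if c = '|' then (!st.1, st.2)
      else if c = '*' ∧ st.1 = false then (st.1, st.2 + 1)
      else st)
    (false, (0 : Int))).2

-- ===== PORT B =====
def countAsterisks1_alt (s : String) : Int :=
  let parts := PySem.Chars.splitOn s.toList ['|']
  (PySem.List.enumerate parts 0).foldl
    (fun acc p => if PySem.Int.mod p.1 2 = 0 then acc + (PySem.Chars.count p.2 ['*'] : Int) else acc)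
    0

-- ===== PRECONDITION & SPEC =====
def Spec_countAsterisks1 (s : String) (out : Int) : Prop := out = countAsterisks1_alt s
instance (s : String) (out : Int) : Decidable (Spec_countAsterisks1 s out) := by unfold Spec_countAsterisks1; infer_instance

-- ===== CLAIM (what is proved, stated in full; the proofs are below) =====
def Claim_equal_countAsterisks1 : Prop := ∀ (s : String), Dom_countAsterisks1 s → Spec_countAsterisks1 s (countAsterisks1 s)

-- ===== LEMMAS AND PROOFS =====

-- reference split on '|' (structural)
def pvSp : List Char → List (List Char)
  | [] => [[]]
  | c :: t =>
    if c = '|' then [] :: pvSp t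
    else
      match pvSp t with
      | [] => [[c]]
      | p :: ps => (c :: p) :: ps

-- reference count: R l b = asterisks counted by A's loop from state b
def pvR : List Char → Bool → Int
  | [], _ => 0
  | c :: t, b =>
    if c = '|' then pvR t (!b)
    else (if c = '*' ∧ b = false then 1 else 0) + pvR t b

-- alternating sum over segments; flag true = current index even
def pvS : List (List Char) → Bool → Int
  | [], _ => 0
  | p :: ps, e => (if e then (p.count '*' : Int) else 0) + pvS ps (!e)

theorem pvSp_ne_nil (l : List Char) : pvSp l ≠ [] := by
  cases l with
  | nil => simp [pvSp]
  | cons c t =>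
    simp only [pvSp]
    split
    · simp
    · cases h : pvSp t <;> simp

theorem pv_go_splitOn (fuel : Nat) :
    ∀ (l cur : List Char) (accs : List (List Char)), l.length < fuel →
      PySem.Chars.splitOn.go ['|'] fuel l cur accs =
        accs.reverse ++ (pvSp l).modifyHead (cur.reverse ++ ·) := by
  induction fuel with
  | zero => intro l cur accs hlt; omega
  | succ n ih =>
    intro l cur accs hlt
    cases l with
    | nil => simp [PySem.Chars.splitOn.go, pvSp]
    | cons c rest =>
      by_cases hc : c = '|'
      · subst hc
        have hpre : List.isPrefixOf ['|'] ('|' :: rest) = true := by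
          simp [List.isPrefixOf]
        rw [PySem.Chars.splitOn.go]
        simp only [hpre, if_true, List.length_cons, List.length_nil,
          List.drop_succ_cons, List.drop_zero]
        rw [ih rest [] (cur.reverse :: accs) (by simp at hlt ⊢; omega)]
        simp only [pvSp, if_true, List.reverse_cons, List.append_assoc,
          List.modifyHead_cons, List.append_nil, List.reverse_nil, List.nil_append,
          List.singleton_append, List.cons_append]
        cases pvSp rest <;> simp
      · have hpre : List.isPrefixOf ['|'] (c :: rest) = false := by
          simp only [List.isPrefixOf, Bool.and_eq_false_iff, beq_eq_false_iff_ne, ne_eq]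
          exact Or.inl fun h => hc h.symm
        rw [PySem.Chars.splitOn.go]
        simp only [hpre, Bool.false_eq_true, if_false]
        rw [ih rest (c :: cur) accs (by simp at hlt ⊢; omega)]
        simp only [List.reverse_cons, pvSp, hc, if_false]
        cases h : pvSp rest with
        | nil => exact absurd h (pvSp_ne_nil rest)
        | cons p ps => simp [List.modifyHead, List.append_assoc]

theorem pv_splitOn_eq (l : List Char) : PySem.Chars.splitOn l ['|'] = pvSp l := by
  rw [PySem.Chars.splitOn, pv_go_splitOn (l.length + 1) l [] [] (by omega)]
  cases h : pvSp l with
  | nil => exact absurd h (pvSp_ne_nil l)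
  | cons p ps => simp [List.modifyHead]

theorem pv_go_count (fuel : Nat) :
    ∀ (l : List Char) (acc : Nat), l.length ≤ fuel →
      PySem.Chars.count.go ['*'] fuel l acc = acc + l.count '*' := by
  induction fuel with
  | zero =>
    intro l acc h
    have : l = [] := List.length_eq_zero_iff.mp (Nat.le_zero.mp h)
    subst this; simp [PySem.Chars.count.go]
  | succ n ih =>
    intro l acc h
    cases l with
    | nil => simp [PySem.Chars.count.go]
    | cons c rest =>
      by_cases hc : c = '*'
      · subst hc
        have hpre : List.isPrefixOf ['*'] ('*' :: rest) = true := by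
          simp [List.isPrefixOf]
        rw [PySem.Chars.count.go]
        simp only [hpre, if_true, List.length_cons, List.length_nil,
          List.drop_succ_cons, List.drop_zero]
        rw [ih rest (acc + 1) (by simp at h ⊢; omega)]
        simp [List.count_cons]
        omega
      · have hpre : List.isPrefixOf ['*'] (c :: rest) = false := by
          simp only [List.isPrefixOf, Bool.and_eq_false_iff, beq_eq_false_iff_ne, ne_eq]
          exact Or.inl fun h => hc h.symm
        rw [PySem.Chars.count.go]
        simp only [hpre, Bool.false_eq_true, if_false]
        rw [ih rest acc (by simp at h ⊢; omega)]
        simp [List.count_cons, hc]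

theorem pv_count_eq (l : List Char) : PySem.Chars.count l ['*'] = l.count '*' := by
  simp [PySem.Chars.count, pv_go_count l.length l 0 (le_refl _)]

theorem pv_enum_foldl (parts : List (List Char)) :
    ∀ (k : Nat) (acc : Int),
      (PySem.List.enumerate parts (k : Int)).foldl
        (fun acc p => if PySem.Int.mod p.1 2 = 0 then acc + (PySem.Chars.count p.2 ['*'] : Int) else acc)
        acc = acc + pvS parts (decide (k % 2 = 0)) := by
  induction parts with
  | nil => intro k acc; simp [PySem.List.enumerate, pvS]
  | cons p ps ih =>
    intro k acc
    rw [PySem.List.enumerate_cons, List.foldl_cons]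
    have hk1 : (k : Int) + 1 = ((k + 1 : Nat) : Int) := by push_cast; ring
    rw [hk1, ih (k + 1)]
    have hmod : PySem.Int.mod (k : Int) 2 = ((k % 2 : Nat) : Int) := by
      exact_mod_cast PySem.Int.mod_natCast k 2
    have hflip : (decide ((k + 1) % 2 = 0)) = !(decide (k % 2 = 0)) := by
      by_cases he : k % 2 = 0
      · have h1 : (k + 1) % 2 = 1 := by omega
        simp [he, h1]
      · have h0 : (k + 1) % 2 = 0 := by omega
        simp [he, h0]
    by_cases he : k % 2 = 0
    · rw [hmod, he, hflip]
      simp [pvS, pv_count_eq, he]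
      ring
    · have h1 : k % 2 = 1 := by omega
      rw [hmod, h1, hflip]
      simp [pvS, he]

theorem pv_S_sp (l : List Char) : ∀ (e : Bool), pvS (pvSp l) e = pvR l (!e) := by
  induction l with
  | nil => intro e; simp [pvSp, pvS, pvR]
  | cons c t ih =>
    intro e
    by_cases hc : c = '|'
    · subst hc
      simp only [pvSp, if_true, pvS, pvR]
      simp [ih (!e)]
    · simp only [pvSp, hc, if_false, pvR]
      cases h : pvSp t with
      | nil => exact absurd h (pvSp_ne_nil t)
      | cons p ps =>
        have := ih e
        rw [h] at this
        simp only [pvS, List.count_cons] at this ⊢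
        by_cases hs : c = '*'
        · subst hs
          cases e <;> simp_all <;> push_cast <;> ring_nf <;> omega
        · cases e <;> simp_all [hs]

theorem pv_foldA (l : List Char) :
    ∀ (b : Bool) (acc : Int),
      (l.foldl
        (fun st c =>
          if c = '|' then (!st.1, st.2)
          else if c = '*' ∧ st.1 = false then (st.1, st.2 + 1)
          else st)
        (b, acc)).2 = acc + pvR l b := by
  induction l with
  | nil => intro b acc; simp [pvR]
  | cons c t ih =>
    intro b acc
    by_cases hc : c = '|'
    · subst hc; simp only [List.foldl_cons, if_true, pvR]
      rw [ih]
    · by_cases hs : c = '*' ∧ b = false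
      · simp only [List.foldl_cons, pvR]
        rw [if_neg hc, if_pos hs, if_neg hc, if_pos hs, ih]
        ring
      · simp only [List.foldl_cons, pvR]
        rw [if_neg hc, if_neg hs, if_neg hc, if_neg hs, ih]
        ring

-- ===== VERDICT (by name: the statement is the Claim_ definition above) =====
theorem countAsterisks1_spec : Claim_equal_countAsterisks1 := by
  intro s _
  show countAsterisks1 s = countAsterisks1_alt s
  have halt : countAsterisks1_alt s =
      (PySem.List.enumerate (PySem.Chars.splitOn s.toList ['|']) (((0 : Nat) : Int))).foldl
        (fun acc p => if PySem.Int.mod p.1 2 = 0 then acc + (PySem.Chars.count p.2 ['*'] : Int) else acc)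
        0 := by
    norm_num [countAsterisks1_alt]
  rw [halt, pv_splitOn_eq, pv_enum_foldl (pvSp s.toList) 0 0]
  unfold countAsterisks1
  rw [pv_foldA]
  simp [pv_S_sp]
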